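-- pv_equiv track=rewrite | github.com/chanwooo/daily-coding | Python3/2209_23_kakao_blind/이진트리.py | solution
-- ===== SOURCE A (Python) =====
-- def solution(numbers):
--     answer = []
--     bin_nums = []
--     for num in numbers:
--         bin_num = bin(num)[2::]
--         if len(bin_num) % 2 == 0:
--             bin_num = "0" + bin_num
--         bin_nums.append(bin_num)
--
--         for i, n in enumerate(bin_num):
--             if i % 2 == 0 and n == '0':
--                 answer.append(0)
--             else:
--                 answer.append(1)
--                 break
--
--     return answer
-- ===== SOURCE B (Python) =====
-- def solution(numbers):
--     def code(num):
--         b = bin(num)[2:]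
--         if len(b) % 2 == 0:
--             return [0, 1]
--         if b[0] != '0':
--             return [1]
--         return [0, 1] if len(b) > 1 else [0]
--     return [x for num in numbers for x in code(num)]
-- ===== Notes on version B (the rewrite author's own statement) =====
-- stated objective: simpler
-- what changed: Replaced the inner character-scanning break-loop (and the dead bin_nums accumulator) with a closed-form per-number branch on the length and first character of bin(num)[2:], emitted via a flat comprehension.
import Mathlib
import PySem

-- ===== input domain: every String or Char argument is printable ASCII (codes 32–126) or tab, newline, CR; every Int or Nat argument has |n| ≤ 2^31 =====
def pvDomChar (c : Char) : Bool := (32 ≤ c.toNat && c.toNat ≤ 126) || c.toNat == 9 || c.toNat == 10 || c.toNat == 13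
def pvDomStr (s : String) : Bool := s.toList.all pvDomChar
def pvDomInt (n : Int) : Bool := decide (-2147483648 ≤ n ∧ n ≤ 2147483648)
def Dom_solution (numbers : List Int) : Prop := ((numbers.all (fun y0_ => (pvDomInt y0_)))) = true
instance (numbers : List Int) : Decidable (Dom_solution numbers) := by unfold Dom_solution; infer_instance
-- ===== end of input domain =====

-- B replaces A's inner character-scanning break-loop with a closed-form branch on
-- len(bin(num)[2:]) and its first character (objective: simpler).

-- ===== PORT A =====
-- the inner 'for i, n in enumerate(bin_num): …' loop with its break
def solutionInner : List (Int × Char) → List Int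
  | [] => []
  | (i, n) :: rest =>
    if i % 2 == 0 && n == '0' then 0 :: solutionInner rest
    else [1]

def solution (numbers : List Int) : List Int :=
  (numbers.foldl
    (fun (st : List Int × List (List Char)) num =>
      let bin_num := PySem.List.slice (PySem.Int.toBinChars0b num) (some 2) none
      let bin_num := if bin_num.length % 2 == 0 then '0' :: bin_num else bin_num
      (st.1 ++ solutionInner (PySem.List.enumerate bin_num), st.2 ++ [bin_num]))
    ([], [])).1

-- ===== PORT B =====
def solutionCode (num : Int) : List Int :=
  let b := PySem.List.slice (PySem.Int.toBinChars0b num) (some 2) none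
  if b.length % 2 == 0 then [0, 1]
  else if b.headD '0' != '0' then [1]   -- b[0]; b = bin(num)[2:] is never empty
  else if b.length > 1 then [0, 1]
  else [0]

def solution_alt (numbers : List Int) : List Int :=
  numbers.flatMap solutionCode

-- ===== PRECONDITION & SPEC =====
def Spec_solution (numbers : List Int) (out : List Int) : Prop := out = solution_alt numbers
instance (numbers : List Int) (out : List Int) : Decidable (Spec_solution numbers out) := by unfold Spec_solution; infer_instance

-- ===== CLAIM (what is proved, stated in full; the proofs are below) =====
def Claim_equal_solution : Prop := ∀ (numbers : List Int), Dom_solution numbers → Spec_solution numbers (solution numbers)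

-- ===== LEMMAS AND PROOFS =====

theorem toDigitsCore_len (b : Nat) : ∀ (f n : Nat) (l : List Char),
    l.length < (Nat.toDigitsCore b (f + 1) n l).length := by
  intro f
  induction f with
  | zero => intro n l; simp only [Nat.toDigitsCore]; split <;> simp
  | succ f ih =>
    intro n l
    simp only [Nat.toDigitsCore]
    split
    · simp
    · exact Nat.lt_trans (by simp) (ih (n / b) (Nat.digitChar (n % b) :: l))

theorem toDigits_ne_nil (b n : Nat) : Nat.toDigits b n ≠ [] := by
  intro h
  have := toDigitsCore_len b n n []
  simp only [Nat.toDigits] at h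
  rw [h] at this
  simp at this

theorem bin2_ne_nil (num : Int) :
    PySem.List.slice (PySem.Int.toBinChars0b num) (some 2) none ≠ [] := by
  unfold PySem.Int.toBinChars0b
  split
  · rw [show ((2 : Int)) = ((2 : Nat) : Int) by norm_num, PySem.List.slice_from_natCast]
    simp
  · rw [show ((2 : Int)) = ((2 : Nat) : Int) by norm_num, PySem.List.slice_from_natCast]
    simpa using toDigits_ne_nil 2 _

-- A's inner loop on a one-character string
theorem inner_single (c : Char) :
    solutionInner (PySem.List.enumerate [c]) = if c == '0' then [0] else [1] := by
  simp [PySem.List.enumerate_cons, PySem.List.enumerate_nil, solutionInner]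

-- A's inner loop on a string of at least two characters
theorem inner_pair (c d : Char) (xs : List Char) :
    solutionInner (PySem.List.enumerate (c :: d :: xs)) = if c == '0' then [0, 1] else [1] := by
  simp [PySem.List.enumerate_cons, solutionInner]

-- the per-number step of A equals B's closed form
theorem step_eq (num : Int) :
    (let bin_num := PySem.List.slice (PySem.Int.toBinChars0b num) (some 2) none
     let bin_num := if bin_num.length % 2 == 0 then '0' :: bin_num else bin_num
     solutionInner (PySem.List.enumerate bin_num)) = solutionCode num := by
  simp only []
  rcases hb : PySem.List.slice (PySem.Int.toBinChars0b num) (some 2) none with _ | ⟨c, xs⟩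
  · exact absurd hb (bin2_ne_nil num)
  · unfold solutionCode
    rw [hb]
    by_cases hev : (c :: xs).length % 2 = 0
    · have hB : ((c :: xs).length % 2 == 0) = true := by rw [beq_iff_eq]; exact hev
      rw [if_pos hB, if_pos hB, inner_pair]
      simp
    · have hN : ¬ (((c :: xs).length % 2 == 0) = true) := by
        rw [beq_iff_eq]; exact hev
      rw [if_neg hN, if_neg hN]
      rcases xs with _ | ⟨d, xs'⟩
      · rw [inner_single]
        by_cases h : c = '0' <;> simp [h]
      · rw [inner_pair]
        by_cases h : c = '0' <;> simp [h]

theorem fold_eq (numbers : List Int) (acc : List Int) (bns : List (List Char)) :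
    (numbers.foldl
      (fun (st : List Int × List (List Char)) num =>
        let bin_num := PySem.List.slice (PySem.Int.toBinChars0b num) (some 2) none
        let bin_num := if bin_num.length % 2 == 0 then '0' :: bin_num else bin_num
        (st.1 ++ solutionInner (PySem.List.enumerate bin_num), st.2 ++ [bin_num]))
      (acc, bns)).1 = acc ++ numbers.flatMap solutionCode := by
  induction numbers generalizing acc bns with
  | nil => simp
  | cons num rest ih =>
    simp only [List.foldl_cons, List.flatMap_cons]
    rw [ih]
    rw [← step_eq num]
    simp

-- ===== VERDICT (by name: the statement is the Claim_ definition above) =====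
theorem solution_spec : Claim_equal_solution := by
  intro numbers _
  unfold Spec_solution solution solution_alt
  simpa using fold_eq numbers [] []
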